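-- pv_equiv track=rewrite | github.com/haukex/my-py-template | tests/test_makefile.py | dollar_replace
-- ===== SOURCE A (Python) =====
-- from itertools import tee, chain
--
-- def pairwise(iterable):
--     """:func:`itertools.pairwise` was added in 3.10, this is a shim"""
--     a, b = tee(iterable)
--     next(b, None)
--     return zip(a, b)
--
-- def dollar_replace(inp :str, trans :dict[str, str]):
--     """Replace ``$$`` and ``$(...)`` sequences as they would appear in Makefile recipes"""
--     replacements :list[tuple[int, int, str]] = []
--     wasdollar = False
--     stack :list[tuple] = []
--     for i, c in enumerate(inp):
--         if wasdollar:
--             if c=='$':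
--                 if not any(stack):  # if not inside $()
--                     replacements.append( (i-1,i,'') )
--             elif c=='(':
--                 assert i>0
--                 stack.append( (i-1,) )
--             else:
--                 raise ValueError(f"Unknown sequence ${c}")
--             wasdollar = False
--         else:
--             if c=='$':
--                 wasdollar = True
--             elif c=='(':
--                 stack.append( () )
--             elif c==')':
--                 if st := stack.pop():
--                     if not any(stack):  # if not inside $()
--                         replacements.append( ( st[0], i+1, trans[ inp[st[0]+2:i].strip() ] ) )
--     if stack:
--         raise IndexError("unclosed paren")
--     replacements.sort(key=lambda x: x[0], reverse=True)
--     assert all( y[0]<x[0] and y[1]<=x[0] for x,y in pairwise(replacements) )  # double-check that there are no overlaps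
--     out = inp
--     for si,ei,r in replacements:
--         out = out[:si] + r + out[ei:]
--     return out
-- ===== SOURCE B (Python) =====
-- def dollar_replace(inp: str, trans: dict[str, str]):
--     """Replace ``$$`` and ``$(...)`` sequences as they would appear in Makefile recipes.
--
--     One-pass rebuild: the output is emitted left to right into a list and joined,
--     instead of collecting replacement spans, sorting them and splicing them in.
--     """
--     parts: list[str] = []
--     stack: list[bool] = []   # True for a '$(' frame, False for a plain '(' frame
--     start = None             # index of the '$' of the outermost open '$(' frame
--     dollar = False
--     for i, c in enumerate(inp):
--         if dollar:
--             dollar = False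
--             if c == '$':
--                 if start is None:
--                     parts.append('$')
--             elif c == '(':
--                 stack.append(True)
--                 if start is None:
--                     start = i - 1
--             else:
--                 raise ValueError(f"Unknown sequence ${c}")
--         elif c == '$':
--             dollar = True
--         elif c == '(':
--             stack.append(False)
--             if start is None:
--                 parts.append(c)
--         elif c == ')':
--             if stack.pop() and not any(stack):
--                 parts.append(trans[inp[start+2:i].strip()])
--                 start = None
--             elif start is None:
--                 parts.append(c)
--         elif start is None:
--             parts.append(c)
--     if stack:
--         raise IndexError("unclosed paren")
--     if dollar:
--         parts.append('$')   # a lone trailing '$' stays, as in the original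
--     return ''.join(parts)
-- ===== Notes on version B (the rewrite author's own statement) =====
-- stated objective: alternative
-- what changed: A collects replacement spans, sorts them descending and repeatedly re-splices the whole string (out = out[:si]+r+out[ei:]); B emits the output directly in a single left-to-right pass into a list joined at the end, with a Boolean frame stack and the start index of the outermost open '$(' group.
import Mathlib
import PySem

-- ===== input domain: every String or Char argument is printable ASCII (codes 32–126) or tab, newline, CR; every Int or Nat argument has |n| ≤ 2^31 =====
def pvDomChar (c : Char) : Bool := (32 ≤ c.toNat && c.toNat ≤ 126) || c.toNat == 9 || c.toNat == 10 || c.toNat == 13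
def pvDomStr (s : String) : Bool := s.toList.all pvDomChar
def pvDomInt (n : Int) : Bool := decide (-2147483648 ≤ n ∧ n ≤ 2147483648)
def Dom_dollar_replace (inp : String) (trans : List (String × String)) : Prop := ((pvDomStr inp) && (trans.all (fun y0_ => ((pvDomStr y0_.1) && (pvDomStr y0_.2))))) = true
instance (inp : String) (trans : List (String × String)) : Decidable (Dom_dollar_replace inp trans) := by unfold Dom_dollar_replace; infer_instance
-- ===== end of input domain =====

-- B replaces A's collect-spans / sort / repeated-splice pipeline by a single left-to-right
-- pass that emits the output directly (objective: alternative algorithm, same observed cost).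

-- ===== PORT A =====
-- dict lookup trans[key]: association list, FIRST match; missing key (KeyError) is outside Pre_
def dr_lookup (trans : List (String × String)) (key : String) : List Char :=
  (((trans.find? (fun p => p.1 == key)).map Prod.snd).getD "").toList

-- the scan loop of A: collects replacement triples (si, ei, r); wasdollar flag, stack of
-- frames (() ↦ none, (i-1,) ↦ some (i-1), top of stack at the head), index counter i for
-- `for i, c in enumerate(inp)`.  Branches where Python raises return the current state
-- (those inputs are excluded by Pre_).
def drA_scan (inp : List Char) (trans : List (String × String)) :
    List Char → Nat → Bool → List (Option Nat) → List (Nat × Nat × List Char) →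
    List (Nat × Nat × List Char)
  | [], _, _, _, reps => reps
  | c :: cs, i, wasdollar, stack, reps =>
    if wasdollar then
      if c = '$' then
        if stack.any Option.isSome then drA_scan inp trans cs (i+1) false stack reps
        else drA_scan inp trans cs (i+1) false stack (reps ++ [(i-1, i, ([] : List Char))])
      else if c = '(' then drA_scan inp trans cs (i+1) false (some (i-1) :: stack) reps
      else reps  -- raise ValueError: outside Pre_
    else
      if c = '$' then drA_scan inp trans cs (i+1) true stack reps
      else if c = '(' then drA_scan inp trans cs (i+1) false (none :: stack) reps
      else if c = ')' then
        match stack with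
        | [] => reps  -- stack.pop() raises IndexError: outside Pre_
        | none :: stack' => drA_scan inp trans cs (i+1) false stack' reps
        | some s :: stack' =>
          if stack'.any Option.isSome then drA_scan inp trans cs (i+1) false stack' reps
          else drA_scan inp trans cs (i+1) false stack'
            (reps ++ [(s, i+1,
              dr_lookup trans (String.mk (PySem.Chars.strip
                (PySem.List.slice inp (some ((s : Int) + 2)) (some (i : Int))))))])
      else drA_scan inp trans cs (i+1) false stack reps

-- the final loop of A: out = out[:si] + r + out[ei:] (si, ei ≥ 0, so take/drop are exact)
def drA_splice (out : List Char) (reps : List (Nat × Nat × List Char)) : List Char :=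
  reps.foldl (fun out x => out.take x.1 ++ x.2.2 ++ out.drop x.2.1) out

def dollar_replace (inp : String) (trans : List (String × String)) : String :=
  let cs := inp.toList
  let reps := drA_scan cs trans cs 0 false [] []
  -- replacements.sort(key=lambda x: x[0], reverse=True)
  let reps := PySem.List.sorted reps (fun x => x.1) true
  String.mk (drA_splice cs reps)

-- ===== PORT B =====
def drB_lookup (trans : List (String × String)) (key : String) : List Char :=
  (((trans.find? (fun p => p.1 == key)).map Prod.snd).getD "").toList

-- the single pass of B: emits the output parts directly; stack of Booleans (True = '$('
-- frame), start = index of the '$' of the outermost open '$(' frame.  Branches where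
-- Python raises return the parts built so far (outside Pre_).
def drB_go (inp : List Char) (trans : List (String × String)) :
    List Char → Nat → Bool → List Bool → Option Nat → List Char → List Char
  | [], _, dollar, _, _, parts => if dollar then parts ++ ['$'] else parts
  | c :: cs, i, dollar, stack, start, parts =>
    if dollar then
      if c = '$' then
        drB_go inp trans cs (i+1) false stack start
          (if start.isNone then parts ++ ['$'] else parts)
      else if c = '(' then
        drB_go inp trans cs (i+1) false (true :: stack)
          (if start.isNone then some (i-1) else start) parts
      else parts  -- raise ValueError: outside Pre_
    else if c = '$' then drB_go inp trans cs (i+1) true stack start parts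
    else if c = '(' then
      drB_go inp trans cs (i+1) false (false :: stack) start
        (if start.isNone then parts ++ [c] else parts)
    else if c = ')' then
      match stack with
      | [] => parts  -- stack.pop() raises IndexError: outside Pre_
      | b :: stack' =>
        if b && !(stack'.any id) then
          drB_go inp trans cs (i+1) false stack' none
            (parts ++ drB_lookup trans (String.mk (PySem.Chars.strip
              (PySem.List.slice inp (some ((start.getD 0 : Int) + 2)) (some (i : Int))))))
        else if start.isNone then drB_go inp trans cs (i+1) false stack' start (parts ++ [c])
        else drB_go inp trans cs (i+1) false stack' start parts
    else
      drB_go inp trans cs (i+1) false stack start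
        (if start.isNone then parts ++ [c] else parts)

def dollar_replace_alt (inp : String) (trans : List (String × String)) : String :=
  String.mk (drB_go inp.toList trans inp.toList 0 false [] none [])

-- ===== PRECONDITION & SPEC =====
-- Pre_ = the inputs on which the Python A returns normally: every '$' is followed by '$'
-- or '(', parentheses are balanced (no pop of an empty stack, nothing left open), and the
-- content of every outermost '$( … )' group, stripped, is a key of trans.  This is a
-- grammar/well-formedness scan of the input (it builds no output); a non-recursive
-- formulation of "balanced with all keys present" does not exist.
def drOk (inp : List Char) (trans : List (String × String)) :
    List Char → Nat → Bool → List Bool → Option Nat → Bool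
  | [], _, _, stack, _ => stack.isEmpty
  | c :: cs, i, dollar, stack, start =>
    if dollar then
      if c = '$' then drOk inp trans cs (i+1) false stack start
      else if c = '(' then
        drOk inp trans cs (i+1) false (true :: stack)
          (if start.isNone then some (i-1) else start)
      else false  -- ValueError
    else if c = '$' then drOk inp trans cs (i+1) true stack start
    else if c = '(' then drOk inp trans cs (i+1) false (false :: stack) start
    else if c = ')' then
      match stack with
      | [] => false  -- IndexError
      | b :: stack' =>
        if b && !(stack'.any id) then
          ((trans.find? (fun p => p.1 = String.mk (PySem.Chars.strip
              (PySem.List.slice inp (some ((start.getD 0 : Int) + 2)) (some (i : Int)))))).isSome)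
            && drOk inp trans cs (i+1) false stack' none
        else drOk inp trans cs (i+1) false stack' start
    else drOk inp trans cs (i+1) false stack start

def Pre_dollar_replace (inp : String) (trans : List (String × String)) : Prop :=
  drOk inp.toList trans inp.toList 0 false [] none = true

instance (inp : String) (trans : List (String × String)) : Decidable (Pre_dollar_replace inp trans) := by
  unfold Pre_dollar_replace; infer_instance

def pvWitness_dollar_replace : String × (List (String × String)) :=
  ("echo $(VAR)/$$HOME $( x )!", [("VAR", "val"), ("x", "y")])

def Spec_dollar_replace (inp : String) (trans : List (String × String)) (out : String) : Prop := out = dollar_replace_alt inp trans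
instance (inp : String) (trans : List (String × String)) (out : String) : Decidable (Spec_dollar_replace inp trans out) := by unfold Spec_dollar_replace; infer_instance

-- ===== CLAIM (what is proved, stated in full; the proofs are below) =====
def Claim_equal_dollar_replace : Prop := ∀ (inp : String) (trans : List (String × String)), Dom_dollar_replace inp trans → Pre_dollar_replace inp trans → Spec_dollar_replace inp trans (dollar_replace inp trans)

-- ===== LEMMAS AND PROOFS =====

-- deepest `some` entry of A's stack (the outermost open '$(' frame) = B's `start`
def lastSome : List (Option Nat) → Option Nat
  | [] => none
  | x :: l => match lastSome l with
    | some s => some s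
    | none => x

-- output of the replacement list, rendered left to right from position pos up to j
def drEmit (xs : List Char) : Nat → List (Nat × Nat × List Char) → Nat → List Char
  | pos, [], j => (xs.drop pos).take (j - pos)
  | pos, (s, e, r) :: R, j => (xs.drop pos).take (s - pos) ++ r ++ drEmit xs e R j

-- well-formed replacement chain: pos ≤ s₁ < e₁ ≤ s₂ < e₂ ≤ … ≤ j
def drWF : Nat → List (Nat × Nat × List Char) → Nat → Prop
  | pos, [], j => pos ≤ j
  | pos, (s, e, _) :: R, j => pos ≤ s ∧ s < e ∧ drWF e R j

lemma lastSome_none_iff (l : List (Option Nat)) :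
    lastSome l = none ↔ l.any Option.isSome = false := by
  induction l with
  | nil => simp [lastSome]
  | cons x l ih =>
    cases hx : lastSome l with
    | none =>
      have hl : l.any Option.isSome = false := ih.1 hx
      cases x <;> simp [lastSome, hx, hl]
    | some s =>
      have hl : ¬ l.any Option.isSome = false := fun h => by simp [ih.2 h] at hx
      simp only [lastSome, hx, List.any_cons]
      constructor
      · intro h; cases h
      · intro h; exact absurd (by simpa using (Bool.or_eq_false_iff.1 h).2) hl

lemma drWF_le {pos j : Nat} {R : List (Nat × Nat × List Char)} (h : drWF pos R j) :
    pos ≤ j := by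
  induction R generalizing pos with
  | nil => simpa [drWF] using h
  | cons x R ih =>
    obtain ⟨s, e, r⟩ := x
    simp only [drWF] at h
    exact le_trans h.1 (le_trans (le_of_lt h.2.1) (ih h.2.2))

lemma drWF_mono {pos j j' : Nat} (R : List (Nat × Nat × List Char)) (h : drWF pos R j)
    (hj : j ≤ j') : drWF pos R j' := by
  induction R generalizing pos with
  | nil => simp [drWF] at *; omega
  | cons x R ih => obtain ⟨s, e, r⟩ := x; simp [drWF] at *; exact ⟨h.1, h.2.1, ih h.2.2⟩

lemma drWF_snoc {pos j : Nat} {R : List (Nat × Nat × List Char)} {s e : Nat} {r : List Char}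
    (h : drWF pos R s) (hse : s < e) (hej : e ≤ j) : drWF pos (R ++ [(s, e, r)]) j := by
  induction R generalizing pos with
  | nil => simp [drWF] at *; exact ⟨h, hse, hej⟩
  | cons x R ih => obtain ⟨s', e', r'⟩ := x; simp [drWF] at *; exact ⟨h.1, h.2.1, ih h.2.2⟩

lemma drWF_lb {pos j : Nat} {R : List (Nat × Nat × List Char)} (h : drWF pos R j) :
    ∀ y ∈ R, pos ≤ y.1 := by
  induction R generalizing pos with
  | nil => simp
  | cons x R ih =>
    obtain ⟨s, e, r⟩ := x
    simp only [drWF] at h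
    intro y hy
    rcases List.mem_cons.1 hy with rfl | hy
    · exact h.1
    · exact le_trans (le_trans h.1 (le_of_lt h.2.1)) (ih h.2.2 y hy)

lemma drWF_fst_lt {pos j : Nat} {R : List (Nat × Nat × List Char)} (h : drWF pos R j) :
    R.Pairwise (fun a b => a.1 < b.1) := by
  induction R generalizing pos with
  | nil => simp
  | cons x R ih =>
    obtain ⟨s, e, r⟩ := x
    simp only [drWF] at h
    exact List.Pairwise.cons (fun y hy => lt_of_lt_of_le h.2.1 (drWF_lb h.2.2 y hy)) (ih h.2.2)

lemma drEmit_snoc (xs : List Char) {pos : Nat} (R : List (Nat × Nat × List Char))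
    {s e j : Nat} (r : List Char) (h : drWF pos R s) :
    drEmit xs pos (R ++ [(s, e, r)]) j = drEmit xs pos R s ++ r ++ (xs.drop e).take (j - e) := by
  induction R generalizing pos with
  | nil => simp [drEmit]
  | cons x R ih =>
    obtain ⟨s', e', r'⟩ := x
    simp only [drWF] at h
    simp only [List.cons_append, drEmit, ih h.2.2, List.append_assoc]

lemma drEmit_extend (xs : List Char) {pos j : Nat} (R : List (Nat × Nat × List Char))
    (h : drWF pos R j) (hj : j < xs.length) :
    drEmit xs pos R (j + 1) = drEmit xs pos R j ++ [xs[j]] := by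
  induction R generalizing pos with
  | nil =>
    simp only [drWF] at h
    simp only [drEmit]
    rw [show j + 1 - pos = (j - pos) + 1 by omega, List.take_succ]
    simp [List.getElem?_drop, show pos + (j - pos) = j by omega, List.getElem?_eq_getElem hj]
  | cons x R ih =>
    obtain ⟨s', e', r'⟩ := x
    simp only [drWF] at h
    simp only [drEmit, ih h.2.2, List.append_assoc]

lemma drEmit_prefix (xs : List Char) {pos s : Nat} (R : List (Nat × Nat × List Char))
    (h : drWF pos R s) :
    drEmit (xs.take s) pos R s = drEmit xs pos R s := by
  induction R generalizing pos with
  | nil => simp [drEmit, List.drop_take, List.take_take]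
  | cons x R ih =>
    obtain ⟨s', e', r'⟩ := x
    simp only [drWF] at h
    have he' : e' ≤ s := drWF_le h.2.2
    simp only [drEmit, ih h.2.2, List.drop_take, List.take_take,
      min_eq_left (by omega : s' - pos ≤ s - pos)]

lemma drWF_append_split {pos j : Nat} {R : List (Nat × Nat × List Char)} {s e : Nat}
    {r : List Char} (h : drWF pos (R ++ [(s, e, r)]) j) :
    drWF pos R s ∧ s < e ∧ e ≤ j := by
  induction R generalizing pos with
  | nil => simpa [drWF] using h
  | cons x R ih =>
    obtain ⟨s', e', r'⟩ := x
    simp only [List.cons_append, drWF] at h ⊢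
    exact ⟨⟨h.1, h.2.1, (ih h.2.2).1⟩, (ih h.2.2).2⟩

lemma drA_splice_cons (X : List Char) (s e : Nat) (r : List Char)
    (L : List (Nat × Nat × List Char)) :
    drA_splice X ((s, e, r) :: L) = drA_splice (X.take s ++ r ++ X.drop e) L := rfl

lemma drA_splice_append (R : List (Nat × Nat × List Char)) :
    ∀ (Y Z : List Char) (j : Nat), drWF 0 R j → j ≤ Y.length →
    drA_splice (Y ++ Z) R.reverse = drA_splice Y R.reverse ++ Z := by
  induction R using List.reverseRecOn with
  | nil => intro Y Z j _ _; rfl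
  | append_singleton R x ih =>
    obtain ⟨s, e, r⟩ := x
    intro Y Z j h hj
    obtain ⟨h1, h2, h3⟩ := drWF_append_split h
    have hsY : s ≤ Y.length := by omega
    have heY : e ≤ Y.length := by omega
    rw [show (R ++ [(s, e, r)]).reverse = (s, e, r) :: R.reverse by simp]
    rw [drA_splice_cons, drA_splice_cons]
    rw [List.take_append_of_le_length hsY, List.drop_append_of_le_length heY]
    have := ih (Y.take s ++ r ++ Y.drop e) Z s h1
      (by simp [List.length_take]; omega)
    rw [List.append_assoc (Y.take s ++ r) (Y.drop e) Z] at this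
    exact this

lemma drA_splice_rev :
    ∀ (R : List (Nat × Nat × List Char)) (X : List Char), drWF 0 R X.length →
    drA_splice X R.reverse = drEmit X 0 R X.length := by
  intro R
  induction R using List.reverseRecOn with
  | nil => intro X h; simp [drA_splice, drEmit]
  | append_singleton R x ih =>
    obtain ⟨s, e, r⟩ := x
    intro X h
    obtain ⟨h1, h2, h3⟩ := drWF_append_split h
    have hsX : s ≤ X.length := by omega
    rw [show (R ++ [(s, e, r)]).reverse = (s, e, r) :: R.reverse by simp]
    rw [drA_splice_cons]
    have step : drA_splice (X.take s ++ (r ++ X.drop e)) R.reverse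
        = drA_splice (X.take s) R.reverse ++ (r ++ X.drop e) :=
      drA_splice_append R (X.take s) (r ++ X.drop e) s h1 (by simp [List.length_take]; omega)
    have hlen : (X.take s).length = s := by simp [List.length_take]; omega
    have ih2 := ih (X.take s) (by rw [hlen]; exact h1)
    rw [drEmit_snoc X R r h1]
    have hdrop : (X.drop e).take (X.length - e) = X.drop e := by
      rw [← List.length_drop (l := X) (i := e)]; exact List.take_length
    rw [hdrop]
    calc drA_splice (X.take s ++ r ++ X.drop e) R.reverse
        = drA_splice (X.take s ++ (r ++ X.drop e)) R.reverse := by rw [List.append_assoc]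
      _ = drA_splice (X.take s) R.reverse ++ (r ++ X.drop e) := step
      _ = drEmit (X.take s) 0 R (X.take s).length ++ (r ++ X.drop e) := by rw [ih2]
      _ = drEmit X 0 R s ++ r ++ X.drop e := by
            rw [hlen, drEmit_prefix X R h1, List.append_assoc]

-- lastSome computation rules
lemma lastSome_cons_none (l : List (Option Nat)) : lastSome (none :: l) = lastSome l := by
  cases h : lastSome l <;> simp [lastSome, h]

lemma lastSome_cons_some {l : List (Option Nat)} (x : Nat) (h : lastSome l = none) :
    lastSome (some x :: l) = some x := by simp [lastSome, h]

lemma lastSome_cons_of_some {l : List (Option Nat)} (x? : Option Nat) {s : Nat}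
    (h : lastSome l = some s) : lastSome (x? :: l) = some s := by simp [lastSome, h]

lemma anySome_of_lastSome {l : List (Option Nat)} {s : Nat} (h : lastSome l = some s) :
    l.any Option.isSome = true := by
  by_contra hm
  have := (lastSome_none_iff l).2 (by simpa using hm)
  simp [this] at h

lemma any_map_isSome (l : List (Option Nat)) :
    (l.map Option.isSome).any id = l.any Option.isSome := by simp [List.any_map]

-- the main scan invariant: A's collected spans, rendered by drEmit, equal B's parts
lemma dr_main (inp : List Char) (trans : List (String × String)) :
    ∀ (cs : List Char) (i : Nat) (w : Bool) (SA : List (Option Nat))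
      (R : List (Nat × Nat × List Char)) (P : List Char),
    i ≤ inp.length → cs = inp.drop i →
    drOk inp trans cs i w (SA.map Option.isSome) (lastSome SA) = true →
    (match lastSome SA, w with
     | none, false => P = drEmit inp 0 R i ∧ drWF 0 R i
     | none, true  => P = drEmit inp 0 R (i-1) ∧ drWF 0 R (i-1) ∧ 1 ≤ i ∧ inp[i-1]? = some '$'
     | some s, _   => P = drEmit inp 0 R s ∧ drWF 0 R s ∧ s + 2 ≤ i) →
    drWF 0 (drA_scan inp trans cs i w SA R) inp.length ∧
    drB_go inp trans cs i w (SA.map Option.isSome) (lastSome SA) P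
      = drEmit inp 0 (drA_scan inp trans cs i w SA R) inp.length := by
  intro cs
  induction cs with
  | nil =>
    intro i w SA R P hi hcs hok hinv
    have hie : inp.length ≤ i := List.drop_eq_nil_iff.1 hcs.symm
    have hieq : i = inp.length := le_antisymm hi hie
    have hSA : SA = [] := by
      simp only [drOk, List.isEmpty_iff, List.map_eq_nil_iff] at hok
      exact hok
    subst hSA
    have hLS : lastSome ([] : List (Option Nat)) = none := rfl
    rw [hLS] at hinv ⊢
    cases w with
    | false =>
      obtain ⟨h1, h2⟩ := hinv
      subst hieq
      exact ⟨h2, by simpa [drA_scan, drB_go] using h1⟩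
    | true =>
      obtain ⟨h1, h2, h3, h4⟩ := hinv
      obtain ⟨hlt4, hg4⟩ := List.getElem?_eq_some_iff.1 h4
      have hext := drEmit_extend inp R h2 hlt4
      rw [show i - 1 + 1 = i by omega] at hext
      subst hieq
      refine ⟨drWF_mono R h2 (by omega), ?_⟩
      simp only [drA_scan, drB_go]
      rw [hext, hg4, h1]
      simp
  | cons c cs ih =>
    intro i w SA R P hi hcs hok hinv
    have hdrop : inp.drop i = c :: cs := hcs.symm
    have hin : inp[i]? = some c := by
      have h0 : (inp.drop i)[0]? = inp[i + 0]? := List.getElem?_drop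
      rw [hdrop] at h0; simpa using h0.symm
    obtain ⟨hlt, hgl⟩ := List.getElem?_eq_some_iff.1 hin
    have hi1 : i + 1 ≤ inp.length := hlt
    have hcs' : cs = inp.drop (i + 1) := by
      have h1 : (inp.drop i).drop 1 = inp.drop (i + 1) := List.drop_drop
      rw [hdrop] at h1; simp at h1; exact h1
    have htake1 : (inp.drop i).take 1 = [c] := by rw [hdrop]; rfl
    cases w with
    | true =>
      by_cases hD : c = '$'
      · subst hD
        cases hLS : lastSome SA with
        | none =>
          rw [hLS] at hinv
          obtain ⟨h1, h2, h3, h4⟩ := hinv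
          have hAny : SA.any Option.isSome = false := (lastSome_none_iff SA).1 hLS
          simp [drOk] at hok
          have inv2 : P ++ ['$'] = drEmit inp 0 (R ++ [(i-1, i, ([] : List Char))]) (i+1) ∧
              drWF 0 (R ++ [(i-1, i, ([] : List Char))]) (i+1) := by
            constructor
            · rw [drEmit_snoc inp R ([] : List Char) h2]
              rw [show i + 1 - i = 1 by omega, htake1, h1]
              simp
            · exact drWF_snoc h2 (by omega) (by omega)
          have H := ih (i+1) false SA (R ++ [(i-1, i, ([] : List Char))]) (P ++ ['$'])
            hi1 hcs' hok (by rw [hLS]; exact inv2)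
          rw [hLS] at H
          simpa [drA_scan, drB_go, hAny, hLS] using H
        | some s =>
          rw [hLS] at hinv
          obtain ⟨h1, h2, h3⟩ := hinv
          have hAny : SA.any Option.isSome = true := anySome_of_lastSome hLS
          simp [drOk] at hok
          have H := ih (i+1) false SA R P hi1 hcs' hok
            (by rw [hLS]; exact ⟨h1, h2, by omega⟩)
          rw [hLS] at H
          simpa [drA_scan, drB_go, hAny, hLS] using H
      · by_cases hPo : c = '('
        · subst hPo
          cases hLS : lastSome SA with
          | none =>
            rw [hLS] at hinv
            obtain ⟨h1, h2, h3, h4⟩ := hinv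
            have hLS2 : lastSome (some (i-1) :: SA) = some (i-1) := lastSome_cons_some _ hLS
            simp [drOk, hLS] at hok
            have hok2 : drOk inp trans cs (i+1) false ((some (i-1) :: SA).map Option.isSome)
                (lastSome (some (i-1) :: SA)) = true := by
              simpa [hLS2] using hok
            have H := ih (i+1) false (some (i-1) :: SA) R P hi1 hcs' hok2
              (by rw [hLS2]; exact ⟨h1, h2, by omega⟩)
            rw [hLS2] at H
            simp only [List.map_cons, Option.isSome_some] at H
            simpa [drA_scan, drB_go, hD, hLS] using H
          | some s =>
            rw [hLS] at hinv
            obtain ⟨h1, h2, h3⟩ := hinv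
            have hLS2 : lastSome (some (i-1) :: SA) = some s := lastSome_cons_of_some _ hLS
            simp [drOk, hLS] at hok
            have hok2 : drOk inp trans cs (i+1) false ((some (i-1) :: SA).map Option.isSome)
                (lastSome (some (i-1) :: SA)) = true := by
              simpa [hLS2] using hok
            have H := ih (i+1) false (some (i-1) :: SA) R P hi1 hcs' hok2
              (by rw [hLS2]; exact ⟨h1, h2, by omega⟩)
            rw [hLS2] at H
            simp only [List.map_cons, Option.isSome_some] at H
            simpa [drA_scan, drB_go, hD, hLS] using H
        · exfalso
          simp [drOk, hD, hPo] at hok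
    | false =>
      by_cases hD : c = '$'
      · subst hD
        simp [drOk] at hok
        have inv2 : (match lastSome SA, true with
           | none, false => P = drEmit inp 0 R (i+1) ∧ drWF 0 R (i+1)
           | none, true  => P = drEmit inp 0 R (i+1-1) ∧ drWF 0 R (i+1-1) ∧ 1 ≤ i+1 ∧ inp[i+1-1]? = some '$'
           | some s, _   => P = drEmit inp 0 R s ∧ drWF 0 R s ∧ s + 2 ≤ i+1) := by
          cases hLS : lastSome SA with
          | none =>
            rw [hLS] at hinv
            obtain ⟨h1, h2⟩ := hinv
            exact ⟨by simpa using h1, by simpa using h2, by omega, by simpa using hin⟩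
          | some s =>
            rw [hLS] at hinv
            obtain ⟨h1, h2, h3⟩ := hinv
            exact ⟨h1, h2, by omega⟩
        have H := ih (i+1) true SA R P hi1 hcs' hok inv2
        simpa [drA_scan, drB_go] using H
      · by_cases hPo : c = '('
        · subst hPo
          simp [drOk, hD] at hok
          have hLS2 : lastSome (none :: SA) = lastSome SA := lastSome_cons_none SA
          have hok2 : drOk inp trans cs (i+1) false ((none :: SA).map Option.isSome)
              (lastSome (none :: SA)) = true := by simpa [hLS2] using hok
          cases hLS : lastSome SA with
          | none =>
            rw [hLS] at hinv
            obtain ⟨h1, h2⟩ := hinv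
            have hext := drEmit_extend inp R h2 hlt
            have H := ih (i+1) false (none :: SA) R (P ++ ['('])
              hi1 hcs' hok2 (by rw [hLS2, hLS]; exact ⟨by rw [hext, h1, hgl], drWF_mono R h2 (by omega)⟩)
            rw [hLS2, hLS] at H
            simp only [List.map_cons, Option.isSome_none] at H
            simpa [drA_scan, drB_go, hD, hLS] using H
          | some s =>
            rw [hLS] at hinv
            obtain ⟨h1, h2, h3⟩ := hinv
            have H := ih (i+1) false (none :: SA) R P
              hi1 hcs' hok2 (by rw [hLS2, hLS]; exact ⟨h1, h2, by omega⟩)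
            rw [hLS2, hLS] at H
            simp only [List.map_cons, Option.isSome_none] at H
            simpa [drA_scan, drB_go, hD, hLS] using H
        · by_cases hC : c = ')'
          · subst hC
            cases SA with
            | nil =>
              exfalso
              simp [drOk, hD, hPo] at hok
            | cons fa SA' =>
              cases fa with
              | none =>
                have hLS2 : lastSome (none :: SA') = lastSome SA' := lastSome_cons_none SA'
                simp [drOk, hD, hPo] at hok
                have hok2 : drOk inp trans cs (i+1) false (SA'.map Option.isSome)
                    (lastSome SA') = true := by simpa [hLS2] using hok
                cases hLS : lastSome SA' with
                | none =>
                  rw [hLS2, hLS] at hinv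
                  obtain ⟨h1, h2⟩ := hinv
                  have hext := drEmit_extend inp R h2 hlt
                  have H := ih (i+1) false SA' R (P ++ [')'])
                    hi1 hcs' hok2
                    (by rw [hLS]; exact ⟨by rw [hext, h1, hgl], drWF_mono R h2 (by omega)⟩)
                  rw [hLS] at H
                  simpa [drA_scan, drB_go, hLS2, hLS] using H
                | some s =>
                  rw [hLS2, hLS] at hinv
                  obtain ⟨h1, h2, h3⟩ := hinv
                  have H := ih (i+1) false SA' R P hi1 hcs' hok2
                    (by rw [hLS]; exact ⟨h1, h2, by omega⟩)
                  rw [hLS] at H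
                  simpa [drA_scan, drB_go, hLS2, hLS] using H
              | some s0 =>
                cases hAny' : SA'.any Option.isSome with
                | true =>
                  obtain ⟨s', hLS'⟩ : ∃ s', lastSome SA' = some s' := by
                    cases hx : lastSome SA' with
                    | none => rw [(lastSome_none_iff SA').1 hx] at hAny'; cases hAny'
                    | some s' => exact ⟨s', rfl⟩
                  have hLS2 : lastSome (some s0 :: SA') = some s' := lastSome_cons_of_some _ hLS'
                  have hmap : (SA'.map Option.isSome).any id = true := by
                    rw [any_map_isSome]; exact hAny'
                  rw [hLS2] at hinv
                  obtain ⟨h1, h2, h3⟩ := hinv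
                  simp [drOk, hD, hPo, hmap] at hok
                  have hok2 : drOk inp trans cs (i+1) false (SA'.map Option.isSome)
                      (lastSome SA') = true := by simpa [hLS2, hLS'] using hok
                  have H := ih (i+1) false SA' R P hi1 hcs' hok2
                    (by rw [hLS']; exact ⟨h1, h2, by omega⟩)
                  rw [hLS'] at H
                  simpa [drA_scan, drB_go, hAny', hmap, hLS2, hLS'] using H
                | false =>
                  have hLS' : lastSome SA' = none := (lastSome_none_iff SA').2 hAny'
                  have hLS2 : lastSome (some s0 :: SA') = some s0 := lastSome_cons_some _ hLS'
                  have hmap : (SA'.map Option.isSome).any id = false := by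
                    rw [any_map_isSome]; exact hAny'
                  rw [hLS2] at hinv
                  obtain ⟨h1, h2, h3⟩ := hinv
                  simp [drOk, hD, hPo, hmap, hLS2] at hok
                  have hok2 : drOk inp trans cs (i+1) false (SA'.map Option.isSome) none = true := hok.2
                  set key : String := String.mk (PySem.Chars.strip
                    (PySem.List.slice inp (some ((s0 : Int) + 2)) (some (i : Int)))) with hkey
                  set r : List Char := dr_lookup trans key with hr
                  have inv2 : P ++ r = drEmit inp 0 (R ++ [(s0, i+1, r)]) (i+1) ∧
                      drWF 0 (R ++ [(s0, i+1, r)]) (i+1) := by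
                    constructor
                    · rw [drEmit_snoc inp R r h2]
                      simp [h1]
                    · exact drWF_snoc h2 (by omega) (by omega)
                  have H := ih (i+1) false SA' (R ++ [(s0, i+1, r)]) (P ++ r)
                    hi1 hcs' (by rw [hLS']; exact hok2) (by rw [hLS']; exact inv2)
                  rw [hLS'] at H
                  have hblk : drB_lookup = dr_lookup := rfl
                  simpa [drA_scan, drB_go, hAny', hmap, hLS2, hblk, hkey, hr] using H
          · -- plain character
            simp [drOk, hD, hPo, hC] at hok
            cases hLS : lastSome SA with
            | none =>
              rw [hLS] at hinv
              obtain ⟨h1, h2⟩ := hinv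
              have hext := drEmit_extend inp R h2 hlt
              have H := ih (i+1) false SA R (P ++ [c]) hi1 hcs' hok
                (by rw [hLS]; exact ⟨by rw [hext, h1, hgl], drWF_mono R h2 (by omega)⟩)
              rw [hLS] at H
              simpa [drA_scan, drB_go, hD, hPo, hC, hLS] using H
            | some s =>
              rw [hLS] at hinv
              obtain ⟨h1, h2, h3⟩ := hinv
              have H := ih (i+1) false SA R P hi1 hcs' hok
                (by rw [hLS]; exact ⟨h1, h2, by omega⟩)
              rw [hLS] at H
              simpa [drA_scan, drB_go, hD, hPo, hC, hLS] using H
-- ===== VERDICT (by name: the statement is the Claim_ definition above) =====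
theorem dollar_replace_spec : Claim_equal_dollar_replace := by
  intro inp trans _hdom hpre
  unfold Spec_dollar_replace dollar_replace dollar_replace_alt
  have h := dr_main inp.toList trans inp.toList 0 false [] [] []
    (Nat.zero_le _) (by simp)
    (by simpa [lastSome] using hpre)
    (by simp [lastSome, drEmit, drWF])
  rcases h with ⟨hwf, heq⟩
  have hsort : PySem.List.sorted (drA_scan inp.toList trans inp.toList 0 false [] [])
      (fun x => x.1) true
      = (drA_scan inp.toList trans inp.toList 0 false [] []).reverse := by
    refine PySem.List.sorted_rev_eq_of_perm_of_pairwise_gt _ _ _ (List.reverse_perm _) ?_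
    exact (List.pairwise_reverse).2 (drWF_fst_lt hwf)
  simp only [hsort]
  rw [drA_splice_rev _ _ hwf]
  have heq2 : drB_go inp.toList trans inp.toList 0 false [] none []
      = drEmit inp.toList 0 (drA_scan inp.toList trans inp.toList 0 false [] []) inp.toList.length := by
    simpa [lastSome] using heq
  rw [heq2]
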